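-- pv_equiv track=rewrite | github.com/Kevinkidsss/exam-1 | scripts/find_cutsites.py | find_distant_pairs
-- ===== SOURCE A (Python) =====
-- def find_distant_pairs(locations, min_distance=80000, max_distance=120000):
--     pairs = []
--     for i in range(len(locations)):
--         for j in range(i+1, len(locations)):
--             distance = locations[j] - locations[i]
--             if min_distance <= distance <= max_distance:
--                 pairs.append((locations[i], locations[j]))
--     return pairs
-- ===== SOURCE B (Python) =====
-- def _bisect_left(a, x):
--     # leftmost insertion point for x in ascending list a (hand-written: no imports here)
--     lo, hi = 0, len(a)
--     while lo < hi:
--         mid = (lo + hi) // 2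
--         if a[mid] < x:
--             lo = mid + 1
--         else:
--             hi = mid
--     return lo
--
--
-- def find_distant_pairs(locations, min_distance=80000, max_distance=120000):
--     # Sort positions by value once; per left index, binary-search the contiguous
--     # block of values inside [x+min, x+max] instead of scanning every later index.
--     n = len(locations)
--     order = sorted(range(n), key=lambda k: locations[k])
--     vals = [locations[k] for k in order]
--     pairs = []
--     for i in range(n):
--         x = locations[i]
--         lo = _bisect_left(vals, x + min_distance)
--         hi = _bisect_left(vals, x + max_distance + 1)
--         for j in sorted(k for k in order[lo:hi] if k > i):
--             pairs.append((x, locations[j]))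
--     return pairs
-- ===== Notes on version B (the rewrite author's own statement) =====
-- stated objective: faster
-- what changed: B sorts the indices by value once and, for each left element, binary-searches the contiguous block of values inside [x+min, x+max], collecting and sorting the matching later indices, instead of A's all-pairs nested scan.
import Mathlib
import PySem

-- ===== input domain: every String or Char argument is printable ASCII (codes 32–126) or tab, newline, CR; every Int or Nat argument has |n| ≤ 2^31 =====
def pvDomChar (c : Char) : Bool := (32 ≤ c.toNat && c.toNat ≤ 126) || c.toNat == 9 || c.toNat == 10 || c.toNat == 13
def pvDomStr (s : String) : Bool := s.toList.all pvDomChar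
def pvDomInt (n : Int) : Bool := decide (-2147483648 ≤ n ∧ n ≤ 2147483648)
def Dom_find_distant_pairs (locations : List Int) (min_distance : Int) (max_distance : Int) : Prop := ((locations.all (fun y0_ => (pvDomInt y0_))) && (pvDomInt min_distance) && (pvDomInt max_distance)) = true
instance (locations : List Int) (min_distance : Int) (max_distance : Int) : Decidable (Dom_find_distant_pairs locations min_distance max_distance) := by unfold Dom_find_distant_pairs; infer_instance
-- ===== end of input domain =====

-- B replaces A's all-pairs nested scan by: sort the indices by value once, then
-- for each left element binary-search the contiguous block of in-window values
-- (objective: faster).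

-- ===== PORT A =====
def find_distant_pairs (locations : List Int) (min_distance : Int) (max_distance : Int) : List (Int × Int) :=
  (PySem.List.pyRange 0 (PySem.List.len locations) 1).foldl (fun pairs i =>
    (PySem.List.pyRange (i + 1) (PySem.List.len locations) 1).foldl (fun pairs j =>
      let distance := PySem.List.pyGetD locations j 0 - PySem.List.pyGetD locations i 0
      if min_distance ≤ distance ∧ distance ≤ max_distance then
        pairs ++ [(PySem.List.pyGetD locations i 0, PySem.List.pyGetD locations j 0)]
      else pairs) pairs) []

-- ===== PORT B =====
-- _bisect_left's while loop, as recursion on hi - lo.  `a[mid]` is ported as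
-- `a.getD mid 0`, exact because 0 ≤ lo ≤ mid < hi ≤ len(a) on every read, and
-- Python's `(lo + hi) // 2` on nonnegative ints is Nat division.
def pvBisect (a : List Int) (x : Int) (lo hi : Nat) : Nat :=
  if lo < hi then
    let mid := (lo + hi) / 2
    if a.getD mid 0 < x then pvBisect a x (mid + 1) hi
    else pvBisect a x lo mid
  else lo
termination_by hi - lo
decreasing_by all_goals omega

def find_distant_pairs_alt (locations : List Int) (min_distance : Int) (max_distance : Int) : List (Int × Int) :=
  let n := PySem.List.len locations
  let order := PySem.List.sorted (PySem.List.pyRange 0 n 1) (fun k => PySem.List.pyGetD locations k 0)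
  let vals := order.map (fun k => PySem.List.pyGetD locations k 0)
  (PySem.List.pyRange 0 n 1).foldl (fun pairs i =>
    let x := PySem.List.pyGetD locations i 0
    let lo := pvBisect vals (x + min_distance) 0 vals.length
    let hi := pvBisect vals (x + max_distance + 1) 0 vals.length
    (PySem.List.sorted
        ((PySem.List.slice order (some (lo : Int)) (some (hi : Int))).filter (fun k => decide (i < k)))
        (fun k => k)).foldl
      (fun pairs j => pairs ++ [(x, PySem.List.pyGetD locations j 0)]) pairs) []

-- ===== PRECONDITION & SPEC =====
def Spec_find_distant_pairs (locations : List Int) (min_distance : Int) (max_distance : Int) (out : List (Int × Int)) : Prop := out = find_distant_pairs_alt locations min_distance max_distance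
instance (locations : List Int) (min_distance : Int) (max_distance : Int) (out : List (Int × Int)) : Decidable (Spec_find_distant_pairs locations min_distance max_distance out) := by unfold Spec_find_distant_pairs; infer_instance

-- ===== CLAIM (what is proved, stated in full; the proofs are below) =====
def Claim_equal_find_distant_pairs : Prop := ∀ (locations : List Int) (min_distance : Int) (max_distance : Int), Dom_find_distant_pairs locations min_distance max_distance → Spec_find_distant_pairs locations min_distance max_distance (find_distant_pairs locations min_distance max_distance)

-- ===== LEMMAS AND PROOFS =====

/-- The pairs contributed by a fixed left index `i`: in-window later indices, ascending. -/
def pvRow (xs : List Int) (mn mx i : Int) : List (Int × Int) :=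
  ((PySem.List.pyRange (i + 1) (PySem.List.len xs) 1).filter
      (fun j => decide (mn ≤ PySem.List.pyGetD xs j 0 - PySem.List.pyGetD xs i 0 ∧
                        PySem.List.pyGetD xs j 0 - PySem.List.pyGetD xs i 0 ≤ mx))).map
    (fun j => (PySem.List.pyGetD xs i 0, PySem.List.pyGetD xs j 0))

/-- B's sorted index list, named for the proofs. -/
def pvOrder (xs : List Int) : List Int :=
  PySem.List.sorted (PySem.List.pyRange 0 (PySem.List.len xs) 1)
    (fun k => PySem.List.pyGetD xs k 0)

theorem pvOrder_nodup (xs : List Int) : (pvOrder xs).Nodup := by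
  rw [pvOrder]
  exact (PySem.List.sorted_perm (PySem.List.pyRange 0 (PySem.List.len xs) 1)
    (fun k => PySem.List.pyGetD xs k 0) false).symm.nodup (PySem.List.nodup_pyRange_one _ _)

theorem pvOrder_mem (xs : List Int) (k : Int) :
    k ∈ pvOrder xs ↔ 0 ≤ k ∧ k < (xs.length : Int) := by
  rw [pvOrder, PySem.List.mem_sorted, PySem.List.mem_pyRange_one, PySem.List.len_eq]

/-- One-step unfolding of `pvBisect` with the `let` reduced. -/
theorem pvBisect_eq (a : List Int) (x : Int) (lo hi : Nat) :
    pvBisect a x lo hi =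
      if lo < hi then
        (if a.getD ((lo + hi) / 2) 0 < x then pvBisect a x ((lo + hi) / 2 + 1) hi
         else pvBisect a x lo ((lo + hi) / 2))
      else lo := by
  rw [pvBisect]

/-- Invariant-carrying specification of the hand-written binary search. -/
theorem pvBisect_spec (a : List Int) (x : Int) (hs : a.Pairwise (· ≤ ·))
    (lo hi : Nat) (hlo : lo ≤ hi) (hhi : hi ≤ a.length)
    (hbelow : ∀ t, t < lo → a.getD t 0 < x)
    (habove : ∀ t, hi ≤ t → t < a.length → x ≤ a.getD t 0) :
    (∀ t, t < pvBisect a x lo hi → a.getD t 0 < x) ∧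
    (∀ t, pvBisect a x lo hi ≤ t → t < a.length → x ≤ a.getD t 0) := by
  have hmono : ∀ t1 t2 : Nat, t1 ≤ t2 → t2 < a.length → a.getD t1 0 ≤ a.getD t2 0 := by
    intro t1 t2 h12 h2
    rcases Nat.lt_or_ge t1 t2 with h | h
    · rw [List.getD_eq_getElem a 0 (by omega), List.getD_eq_getElem a 0 h2]
      exact List.pairwise_iff_getElem.mp hs t1 t2 (by omega) h2 h
    · have : t1 = t2 := by omega
      subst this; rfl
  rw [pvBisect_eq]
  split_ifs with hlt hmid
  · exact pvBisect_spec a x hs ((lo + hi) / 2 + 1) hi (by omega) hhi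
      (fun t ht => by
        rcases Nat.lt_or_ge t lo with h | h
        · exact hbelow t h
        · exact lt_of_le_of_lt (hmono t ((lo + hi) / 2) (by omega) (by omega)) hmid)
      habove
  · exact pvBisect_spec a x hs lo ((lo + hi) / 2) (by omega) (by omega) hbelow
      (fun t ht htl => by
        rcases Nat.lt_or_ge t hi with h | h
        · exact le_trans (not_lt.mp hmid) (hmono ((lo + hi) / 2) t ht (by omega))
        · exact habove t h htl)
  · exact ⟨fun t ht => hbelow t (by omega), fun t ht htl => habove t (by omega) htl⟩
termination_by hi - lo
decreasing_by all_goals omega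

/-- The heart of the proof: per left index `i`, B's sorted filtered slice is exactly
the index list A's inner loop enumerates. -/
theorem pvSlice_sorted_eq (xs : List Int) (mn mx i : Int) (hi0 : 0 ≤ i) :
    PySem.List.sorted
        ((PySem.List.slice (pvOrder xs)
            (some ((pvBisect ((pvOrder xs).map (fun k => PySem.List.pyGetD xs k 0))
                (PySem.List.pyGetD xs i 0 + mn) 0
                ((pvOrder xs).map (fun k => PySem.List.pyGetD xs k 0)).length : Nat) : Int))
            (some ((pvBisect ((pvOrder xs).map (fun k => PySem.List.pyGetD xs k 0))
                (PySem.List.pyGetD xs i 0 + mx + 1) 0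
                ((pvOrder xs).map (fun k => PySem.List.pyGetD xs k 0)).length : Nat) : Int))).filter
          (fun k => decide (i < k)))
        (fun k => k) =
      (PySem.List.pyRange (i + 1) (PySem.List.len xs) 1).filter
        (fun j => decide (mn ≤ PySem.List.pyGetD xs j 0 - PySem.List.pyGetD xs i 0 ∧
                          PySem.List.pyGetD xs j 0 - PySem.List.pyGetD xs i 0 ≤ mx)) := by
  set key : Int → Int := fun k => PySem.List.pyGetD xs k 0 with hkey
  set x : Int := PySem.List.pyGetD xs i 0 with hx
  set ord : List Int := pvOrder xs with hord
  set vals : List Int := ord.map key with hvals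
  have hvlen : vals.length = ord.length := by simp [hvals]
  have hvs : vals.Pairwise (· ≤ ·) := PySem.List.sorted_map_key_pairwise _ key
  have hvt : ∀ (t : Nat) (ht : t < ord.length), vals.getD t 0 = key (ord[t]'ht) := by
    intro t ht
    rw [List.getD_eq_getElem vals 0 (by omega)]
    simp [hvals]
  set lo : Nat := pvBisect vals (x + mn) 0 vals.length with hlodef
  set hi : Nat := pvBisect vals (x + mx + 1) 0 vals.length with hhidef
  obtain ⟨hlo1, hlo2⟩ := pvBisect_spec vals (x + mn) hvs 0 vals.length (by omega) le_rfl
    (by omega) (fun t ht _ => absurd ht (by omega))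
  obtain ⟨hhi1, hhi2⟩ := pvBisect_spec vals (x + mx + 1) hvs 0 vals.length (by omega) le_rfl
    (by omega) (fun t ht _ => absurd ht (by omega))
  -- membership characterisation of the slice
  have hmem : ∀ k : Int, k ∈ List.take (hi - lo) (List.drop lo ord) ↔
      (k ∈ ord ∧ x + mn ≤ key k ∧ key k ≤ x + mx) := by
    intro k
    constructor
    · intro hk
      obtain ⟨m, hm, hkm⟩ := List.getElem_of_mem hk
      have hmb : m < hi - lo ∧ lo + m < ord.length := by
        rw [List.length_take, List.length_drop] at hm; omega
      have hlen : lo + m < ord.length := hmb.2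
      have hk' : ord[lo + m] = k := by
        simp only [List.getElem_take, List.getElem_drop] at hkm; exact hkm
      refine ⟨hk' ▸ List.getElem_mem hlen, ?_, ?_⟩
      · have := hlo2 (lo + m) (by omega) (by omega)
        rw [hvt (lo + m) hlen, hk'] at this; exact this
      · have := hhi1 (lo + m) (by omega)
        rw [hvt (lo + m) hlen, hk'] at this; omega
    · rintro ⟨hkord, hk1, hk2⟩
      obtain ⟨t, ht, hkt⟩ := List.getElem_of_mem hkord
      have htlo : lo ≤ t := by
        by_contra h
        have := hlo1 t (by omega)
        rw [hvt t ht, hkt] at this; omega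
      have hthi : t < hi := by
        by_contra h
        have := hhi2 t (by omega) (by omega)
        rw [hvt t ht, hkt] at this; omega
      have hm : t - lo < (List.take (hi - lo) (List.drop lo ord)).length := by
        rw [List.length_take, List.length_drop]; omega
      have : (List.take (hi - lo) (List.drop lo ord))[t - lo] = k := by
        simp only [List.getElem_take, List.getElem_drop]
        exact (getElem_congr rfl (show lo + (t - lo) = t by omega)
          (by omega : lo + (t - lo) < ord.length)).trans hkt
      exact this ▸ List.getElem_mem hm
  -- the two filtered lists are permutations, and the right one is strictly ascending
  rw [PySem.List.slice_natCast]
  set jsB : List Int := (List.take (hi - lo) (List.drop lo ord)).filter (fun k => decide (i < k))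
    with hjsB
  set jsA : List Int := (PySem.List.pyRange (i + 1) (PySem.List.len xs) 1).filter
      (fun j => decide (mn ≤ key j - x ∧ key j - x ≤ mx)) with hjsA
  have hBnodup : jsB.Nodup := by
    exact (List.filter_sublist.trans
      ((List.take_sublist _ _).trans (List.drop_sublist _ _))).nodup (pvOrder_nodup xs)
  have hApw : jsA.Pairwise (· < ·) :=
    (PySem.List.pairwise_lt_pyRange_one _ _).filter _
  have hAnodup : jsA.Nodup := hApw.imp (fun h => ne_of_lt h)
  have hperm : jsA.Perm jsB := by
    rw [List.perm_ext_iff_of_nodup hAnodup hBnodup]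
    intro k
    rw [hjsA, hjsB, List.mem_filter, List.mem_filter, PySem.List.mem_pyRange_one,
      PySem.List.len_eq, hmem k, pvOrder_mem]
    constructor
    · rintro ⟨⟨h1, h2⟩, h3⟩
      rw [decide_eq_true_iff] at h3
      exact ⟨⟨⟨by omega, h2⟩, by omega, by omega⟩, by simp; omega⟩
    · rintro ⟨⟨⟨h0, h1⟩, h2, h3⟩, h4⟩
      rw [decide_eq_true_iff] at h4
      exact ⟨⟨by omega, h1⟩, by simp; omega⟩
  exact PySem.List.sorted_eq_of_perm_of_pairwise_lt jsB jsA (fun k => k) hperm hApw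

theorem pvA_eq (xs : List Int) (mn mx : Int) :
    find_distant_pairs xs mn mx =
      (PySem.List.pyRange 0 (PySem.List.len xs) 1).flatMap (pvRow xs mn mx) := by
  unfold find_distant_pairs
  rw [PySem.List.foldl_congr_mem _ _ (fun pairs i => pairs ++ pvRow xs mn mx i) _ ?hrow,
    PySem.List.foldl_append_eq_flatMap, List.nil_append]
  case hrow =>
    intro pairs i _
    show List.foldl (fun pairs j =>
        if mn ≤ PySem.List.pyGetD xs j 0 - PySem.List.pyGetD xs i 0 ∧
           PySem.List.pyGetD xs j 0 - PySem.List.pyGetD xs i 0 ≤ mx then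
          pairs ++ [(PySem.List.pyGetD xs i 0, PySem.List.pyGetD xs j 0)]
        else pairs) pairs _ = _
    rw [PySem.List.foldl_append_ite]
    rfl

theorem pvB_eq (xs : List Int) (mn mx : Int) :
    find_distant_pairs_alt xs mn mx =
      (PySem.List.pyRange 0 (PySem.List.len xs) 1).flatMap (pvRow xs mn mx) := by
  simp only [find_distant_pairs_alt]
  rw [PySem.List.foldl_congr_mem _ _ (fun pairs i => pairs ++ pvRow xs mn mx i) _ ?hrow,
    PySem.List.foldl_append_eq_flatMap, List.nil_append]
  case hrow =>
    intro pairs i hi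
    obtain ⟨h0, -⟩ := PySem.List.mem_pyRange_one.mp hi
    beta_reduce
    rw [PySem.List.foldl_append_singleton_eq_map]
    show pairs ++ (PySem.List.sorted _ _).map _ = _
    rw [show PySem.List.sorted (PySem.List.pyRange 0 (PySem.List.len xs) 1)
          (fun k => PySem.List.pyGetD xs k 0) = pvOrder xs from rfl,
      pvSlice_sorted_eq xs mn mx i h0]
    rfl

-- ===== VERDICT (by name: the statement is the Claim_ definition above) =====
theorem find_distant_pairs_spec : Claim_equal_find_distant_pairs := by
  intro locations mn mx _
  unfold Spec_find_distant_pairs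
  rw [pvA_eq, pvB_eq]
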